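-- pv_equiv track=rewrite | github.com/weather-gov/weather.gov | forecast/backend/util.py | get_no_impact_risk_labels
-- ===== SOURCE A (Python) =====
-- GHWO_RISK_MAPPINGS = {
--     "BlowingDust": "Blowing Dust Risk",
--     "CoastalFlood": "Coastal Flood Risk",
--     "ConvectiveWind": "Thunderstorm Wind Risk",
--     "ExcessiveRainfall": "Excessive Rainfall Risk",
--     "ExtremeCold": "Extreme Cold Risk",
--     "ExtremeHeat": "Extreme Heat Risk",
--     "FireWeather": "Fire Weather Risk",
--     "Fog": "Fog Risk",
--     "FreezingSpray": "Freezing Spray Risk",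
--     "Frost/Freeze": "Frost/Freeze Risk",
--     "Hail": "Hail Risk",
--     "HighSurf": "High Surf Risk",
--     "IceAccumulation": "Ice Accumulation Risk",
--     "LakeshoreFlood": "Lakeshore Flood Risk",
--     "Lightning": "Lightning Risk",
--     "Marine": "Marine Hazard Risk",
--     "NonConvectiveWind": "Wind Risk",
--     "RipRisk": "Rip Current Risk",
--     "SevereThunderstorm": "Severe Thunderstorm Risk",
--     "SnowSleet": "Snow/Sleet Risk",
--     "SwimRisk": "Swim Risk",
--     "Tornado": "Tornado Risk",
-- }
--
-- def get_no_impact_risk_labels(county_ghwo_data):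
--     """Return a list of risk factor ids corresponding to risks that are never above 0."""
--     risk_labels = set()
--     for risk_id, risk_label in GHWO_RISK_MAPPINGS.items():
--         has_level = False
--         for day in county_ghwo_data["days"]:
--             if risk_id in day and day[risk_id] > 0:
--                 has_level = True
--         if not has_level:
--             risk_labels.add(risk_label)
--
--     return list(risk_labels)
-- ===== SOURCE B (Python) =====
-- GHWO_RISK_MAPPINGS = {
--     "BlowingDust": "Blowing Dust Risk",
--     "CoastalFlood": "Coastal Flood Risk",
--     "ConvectiveWind": "Thunderstorm Wind Risk",
--     "ExcessiveRainfall": "Excessive Rainfall Risk",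
--     "ExtremeCold": "Extreme Cold Risk",
--     "ExtremeHeat": "Extreme Heat Risk",
--     "FireWeather": "Fire Weather Risk",
--     "Fog": "Fog Risk",
--     "FreezingSpray": "Freezing Spray Risk",
--     "Frost/Freeze": "Frost/Freeze Risk",
--     "Hail": "Hail Risk",
--     "HighSurf": "High Surf Risk",
--     "IceAccumulation": "Ice Accumulation Risk",
--     "LakeshoreFlood": "Lakeshore Flood Risk",
--     "Lightning": "Lightning Risk",
--     "Marine": "Marine Hazard Risk",
--     "NonConvectiveWind": "Wind Risk",
--     "RipRisk": "Rip Current Risk",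
--     "SevereThunderstorm": "Severe Thunderstorm Risk",
--     "SnowSleet": "Snow/Sleet Risk",
--     "SwimRisk": "Swim Risk",
--     "Tornado": "Tornado Risk",
-- }
--
--
-- def get_no_impact_risk_labels(county_ghwo_data):
--     """Return a list of risk factor ids corresponding to risks that are never above 0."""
--     # Day-major single pass: collect every risk id that is ever above 0,
--     # then the answer is the complement of that set over the mapping.
--     active_ids = set()
--     for day in county_ghwo_data["days"]:
--         for rid, level in day.items():
--             if level > 0:
--                 active_ids.add(rid)
--     return list({label for rid, label in GHWO_RISK_MAPPINGS.items() if rid not in active_ids})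
-- ===== Notes on version B (the rewrite author's own statement) =====
-- stated objective: alternative
-- what changed: A is risk-major: for every mapping entry it rescans all days maintaining a has_level flag and adds the label; B is day-major: one pass over each day's own items collects the set of active risk ids, and the result is the complement set-comprehension over the mapping.
-- outside the precondition, e.g. on get_no_impact_risk_labels({}): A raises KeyError, B raises KeyError
import Mathlib
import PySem

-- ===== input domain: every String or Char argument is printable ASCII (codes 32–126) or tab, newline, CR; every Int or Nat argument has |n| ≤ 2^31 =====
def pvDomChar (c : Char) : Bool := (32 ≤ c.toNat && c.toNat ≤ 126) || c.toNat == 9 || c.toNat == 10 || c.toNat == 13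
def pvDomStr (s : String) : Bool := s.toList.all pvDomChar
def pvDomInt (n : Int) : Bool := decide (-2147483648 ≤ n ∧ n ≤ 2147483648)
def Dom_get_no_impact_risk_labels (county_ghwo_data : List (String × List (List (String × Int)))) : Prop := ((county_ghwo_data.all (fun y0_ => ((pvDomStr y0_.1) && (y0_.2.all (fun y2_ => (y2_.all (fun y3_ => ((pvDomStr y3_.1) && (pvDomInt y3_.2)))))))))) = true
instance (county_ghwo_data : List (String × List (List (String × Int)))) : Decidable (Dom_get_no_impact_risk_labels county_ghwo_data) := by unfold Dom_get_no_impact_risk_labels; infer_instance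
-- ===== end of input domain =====

-- B replaces A's risk-major rescan (per-risk has_level flag over all days) by one day-major
-- pass over each day's own items collecting the active ids, then takes the complement set
-- over the mapping (alternative decomposition, same result).


-- module constant shared by both Pythons
def GHWO_RISK_MAPPINGS : List (String × String) := [
  ("BlowingDust", "Blowing Dust Risk"),
  ("CoastalFlood", "Coastal Flood Risk"),
  ("ConvectiveWind", "Thunderstorm Wind Risk"),
  ("ExcessiveRainfall", "Excessive Rainfall Risk"),
  ("ExtremeCold", "Extreme Cold Risk"),
  ("ExtremeHeat", "Extreme Heat Risk"),
  ("FireWeather", "Fire Weather Risk"),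
  ("Fog", "Fog Risk"),
  ("FreezingSpray", "Freezing Spray Risk"),
  ("Frost/Freeze", "Frost/Freeze Risk"),
  ("Hail", "Hail Risk"),
  ("HighSurf", "High Surf Risk"),
  ("IceAccumulation", "Ice Accumulation Risk"),
  ("LakeshoreFlood", "Lakeshore Flood Risk"),
  ("Lightning", "Lightning Risk"),
  ("Marine", "Marine Hazard Risk"),
  ("NonConvectiveWind", "Wind Risk"),
  ("RipRisk", "Rip Current Risk"),
  ("SevereThunderstorm", "Severe Thunderstorm Risk"),
  ("SnowSleet", "Snow/Sleet Risk"),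
  ("SwimRisk", "Swim Risk"),
  ("Tornado", "Tornado Risk")]

-- ===== PORT A =====
-- 'risk_id in day and day[risk_id] > 0' (never raises: guarded lookup)
def pvDayHit (day : List (String × Int)) (rid : String) : Bool :=
  PySem.Dict.contains (PySem.Dict.mk day) rid && decide (0 < PySem.Dict.getD (PySem.Dict.mk day) rid 0)

def get_no_impact_risk_labels (county_ghwo_data : List (String × List (List (String × Int)))) : List String :=
  let days := (PySem.Dict.get? (PySem.Dict.mk county_ghwo_data) "days").getD []   -- KeyError excluded by Pre_
  GHWO_RISK_MAPPINGS.foldl (fun risk_labels p =>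
    let has_level := days.foldl (fun b day => if pvDayHit day p.1 then true else b) false
    if !has_level then PySem.Set.add risk_labels p.2 else risk_labels) PySem.Set.empty

-- ===== PORT B =====
def get_no_impact_risk_labels_alt (county_ghwo_data : List (String × List (List (String × Int)))) : List String :=
  let days := (PySem.Dict.get? (PySem.Dict.mk county_ghwo_data) "days").getD []   -- KeyError excluded by Pre_
  -- for day in days: for rid, level in day.items(): if level > 0: active_ids.add(rid)
  let active_ids : PySem.Set String := days.foldl (fun acc day =>
    (PySem.Dict.mk day).items.foldl (fun acc kv =>
      if 0 < kv.2 then PySem.Set.add acc kv.1 else acc) acc) PySem.Set.empty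
  -- {label for rid, label in GHWO_RISK_MAPPINGS.items() if rid not in active_ids}
  PySem.Set.ofList (GHWO_RISK_MAPPINGS.filterMap (fun p =>
    if PySem.Set.contains active_ids p.1 then none else some p.2))

-- ===== PRECONDITION & SPEC =====
-- A does county_ghwo_data["days"]: Pre_ excludes exactly the inputs without a "days" key (KeyError).
-- It also requires each day's ids to be duplicate-free: a Python dict can never carry duplicate
-- keys, so the duplicate-key association lists are artefacts of the encoding with no canonical reading.
def Pre_get_no_impact_risk_labels (county_ghwo_data : List (String × List (List (String × Int)))) : Prop :=
  (PySem.Dict.get? (PySem.Dict.mk county_ghwo_data) "days").isSome = true ∧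
  ∀ day ∈ (PySem.Dict.get? (PySem.Dict.mk county_ghwo_data) "days").getD [],
    (day.map Prod.fst).Nodup
instance (county_ghwo_data : List (String × List (List (String × Int)))) : Decidable (Pre_get_no_impact_risk_labels county_ghwo_data) := by unfold Pre_get_no_impact_risk_labels; infer_instance

def pvWitness_get_no_impact_risk_labels : (List (String × List (List (String × Int)))) :=
  [("days", [[("Fog", 1), ("Hail", 0)]])]

def Spec_get_no_impact_risk_labels (county_ghwo_data : List (String × List (List (String × Int)))) (out : List String) : Prop := out = get_no_impact_risk_labels_alt county_ghwo_data
instance (county_ghwo_data : List (String × List (List (String × Int)))) (out : List String) : Decidable (Spec_get_no_impact_risk_labels county_ghwo_data out) := by unfold Spec_get_no_impact_risk_labels; infer_instance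

-- ===== CLAIM (what is proved, stated in full; the proofs are below) =====
def Claim_equal_get_no_impact_risk_labels : Prop := ∀ (county_ghwo_data : List (String × List (List (String × Int)))), Dom_get_no_impact_risk_labels county_ghwo_data → Pre_get_no_impact_risk_labels county_ghwo_data → Spec_get_no_impact_risk_labels county_ghwo_data (get_no_impact_risk_labels county_ghwo_data)

-- ===== LEMMAS AND PROOFS =====

-- filterMap with an if-none/some test is filter-then-map
theorem pvFilterMapIf {a b : Type} (c : a × b -> Bool) (l : List (a × b)) :
    l.filterMap (fun p => if c p then none else some p.2)
      = (l.filter (fun p => !c p)).map Prod.snd := by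
  induction l with
  | nil => rfl
  | cons p l ih => by_cases h : c p <;> simp [h, ih]

-- membership in B's one-day pass over the day's items
theorem pvMemDayAdd (day : List (String × Int)) (s : PySem.Set String) (x : String) :
    (x ∈ (PySem.Dict.mk day).items.foldl (fun acc kv =>
        if 0 < kv.2 then PySem.Set.add acc kv.1 else acc) s)
      ↔ x ∈ s ∨ ∃ kv ∈ day, x = kv.1 ∧ 0 < kv.2 := by
  have hfun : (fun (acc : PySem.Set String) (kv : String × Int) =>
      if 0 < kv.2 then PySem.Set.add acc kv.1 else acc)
      = (fun acc kv => if decide (0 < kv.2) = true then PySem.Set.add acc kv.1 else acc) := by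
    funext acc kv; simp
  rw [hfun, PySem.List.foldl_if_eq_foldl_filter]
  have h := PySem.Set.mem_foldl_add (f := Prod.fst)
    (l := (PySem.Dict.mk day).items.filter (fun kv => decide (0 < kv.2))) (s := s) (y := x)
  simp only [List.mem_filter] at h
  rw [h]
  constructor
  · rintro (h' | ⟨kv, ⟨hkv, hh⟩, rfl⟩)
    · exact Or.inl h'
    · exact Or.inr ⟨kv, hkv, rfl, by simpa using hh⟩
  · rintro (h' | ⟨kv, hkv, rfl, hh⟩)
    · exact Or.inl h'
    · exact Or.inr ⟨kv, ⟨hkv, by simpa using hh⟩, rfl⟩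

-- membership in B's active_ids set
theorem pvActiveMem (days : List (List (String × Int))) (s : PySem.Set String) (x : String) :
    (x ∈ days.foldl (fun acc day =>
        (PySem.Dict.mk day).items.foldl (fun acc kv =>
          if 0 < kv.2 then PySem.Set.add acc kv.1 else acc) acc) s)
      ↔ x ∈ s ∨ ∃ d ∈ days, ∃ kv ∈ d, x = kv.1 ∧ 0 < kv.2 := by
  induction days generalizing s with
  | nil => simp
  | cons d ds ih =>
      rw [List.foldl_cons, ih, pvMemDayAdd]
      constructor
      · rintro ((h | ⟨kv, hkv, rfl, hh⟩) | ⟨d', hd', kv, hkv, rfl, hh⟩)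
        · exact Or.inl h
        · exact Or.inr ⟨d, by simp, kv, hkv, rfl, hh⟩
        · exact Or.inr ⟨d', by simp [hd'], kv, hkv, rfl, hh⟩
      · rintro (h | ⟨d', hd', kv, hkv, rfl, hh⟩)
        · exact Or.inl (Or.inl h)
        · rcases List.mem_cons.1 hd' with rfl | hd'
          · exact Or.inl (Or.inr ⟨kv, hkv, rfl, hh⟩)
          · exact Or.inr ⟨d', hd', kv, hkv, rfl, hh⟩

-- on a duplicate-free day, A's guarded lookup and B's item scan agree
theorem pvHitIff (day : List (String × Int)) (rid : String)
    (hnd : (day.map Prod.fst).Nodup) :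
    pvDayHit day rid = true ↔ ∃ kv ∈ day, rid = kv.1 ∧ 0 < kv.2 := by
  unfold pvDayHit
  simp only [Bool.and_eq_true, decide_eq_true_eq]
  constructor
  · rintro ⟨hc, hv⟩
    refine ⟨(rid, PySem.Dict.getD (PySem.Dict.mk day) rid 0), ?_, rfl, hv⟩
    rw [PySem.Dict.contains_eq_isSome_get?] at hc
    obtain ⟨v, hv'⟩ := Option.isSome_iff_exists.1 hc
    have hm := PySem.Dict.mem_items_of_get?_eq_some (PySem.Dict.mk day) hv'
    simpa [PySem.Dict.getD, hv'] using hm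
  · rintro ⟨kv, hkv, rfl, hv⟩
    have hkv' : (kv.1, kv.2) ∈ (PySem.Dict.mk day).items := by simpa using hkv
    have hnd' : (PySem.Dict.mk day).keys.Nodup := by simpa [PySem.Dict.keys] using hnd
    have hget : (PySem.Dict.mk day).getD kv.1 0 = kv.2 :=
      PySem.Dict.getD_of_mem_items (PySem.Dict.mk day) hkv' hnd' 0
    refine ⟨?_, by rw [hget]; exact hv⟩
    rw [PySem.Dict.contains_eq_isSome_get?]
    have hg := PySem.Dict.get?_of_mem_items (PySem.Dict.mk day) hkv' hnd'
    simp [hg]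
  
theorem pvMain (days : List (List (String × Int)))
    (hnd : ∀ day ∈ days, (day.map Prod.fst).Nodup) :
    GHWO_RISK_MAPPINGS.foldl (fun risk_labels p =>
      let has_level := days.foldl (fun b day => if pvDayHit day p.1 then true else b) false
      if !has_level then PySem.Set.add risk_labels p.2 else risk_labels) PySem.Set.empty
    = (let active_ids : PySem.Set String := days.foldl (fun acc day =>
         (PySem.Dict.mk day).items.foldl (fun acc kv =>
           if 0 < kv.2 then PySem.Set.add acc kv.1 else acc) acc) PySem.Set.empty
       PySem.Set.ofList (GHWO_RISK_MAPPINGS.filterMap (fun p =>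
         if PySem.Set.contains active_ids p.1 then none else some p.2))) := by
  show _ = PySem.Set.ofList _
  set active_ids := days.foldl (fun acc day =>
      (PySem.Dict.mk day).items.foldl (fun acc kv =>
        if 0 < kv.2 then PySem.Set.add acc kv.1 else acc) acc) PySem.Set.empty with hact
  -- both programs test the same per-risk condition
  have hcond : ∀ p ∈ GHWO_RISK_MAPPINGS,
      PySem.Set.contains active_ids p.1 = days.any (fun d => pvDayHit d p.1) := by
    intro p hp
    rw [Bool.eq_iff_iff, PySem.Set.contains_iff, hact, pvActiveMem]
    simp only [PySem.Set.empty, List.not_mem_nil, false_or, List.any_eq_true]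
    constructor
    · rintro ⟨d, hd, kv, hkv, hq, hh⟩
      exact ⟨d, hd, (pvHitIff d p.1 (hnd d hd)).2 ⟨kv, hkv, hq, hh⟩⟩
    · rintro ⟨d, hd, hh⟩
      obtain ⟨kv, hkv, hq, hv⟩ := (pvHitIff d p.1 (hnd d hd)).1 hh
      exact ⟨d, hd, kv, hkv, hq, hv⟩
  -- A's inner flag loop is any; its outer loop is a filtered add-fold
  have hA : GHWO_RISK_MAPPINGS.foldl (fun risk_labels p =>
      let has_level := days.foldl (fun b day => if pvDayHit day p.1 then true else b) false
      if !has_level then PySem.Set.add risk_labels p.2 else risk_labels) PySem.Set.empty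
      = (GHWO_RISK_MAPPINGS.filter (fun p => !(PySem.Set.contains active_ids p.1))).foldl
          (fun s p => PySem.Set.add s p.2) PySem.Set.empty := by
    rw [← PySem.List.foldl_if_eq_foldl_filter]
    apply PySem.List.foldl_congr_mem
    intro acc p hp
    simp only [PySem.List.foldl_if_true_eq, Bool.false_or, hcond p hp]
  rw [hA, pvFilterMapIf, PySem.Set.ofList_eq_foldl, List.foldl_map]
  rfl

-- ===== VERDICT (by name: the statement is the Claim_ definition above) =====
theorem get_no_impact_risk_labels_spec : Claim_equal_get_no_impact_risk_labels := by
  intro d _ hpre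
  unfold Spec_get_no_impact_risk_labels get_no_impact_risk_labels get_no_impact_risk_labels_alt
  exact pvMain _ hpre.2
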